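-- pv_equiv track=rewrite | github.com/julianespinel/training | codeforces/dominated_subarray.py | solve
-- ===== SOURCE A (Python) =====
-- def updateHistory(index, number, history):
--     if not number in history:
--         history[number] = { "latestIndex": index, "minDifference": None }
--         return
--
--     value = history[number]
--     latestIndex = value["latestIndex"]
--     minDifference = value["minDifference"]
--     minimum = index - latestIndex
--
--     if not minDifference or minimum < minDifference:
--         history[number] = { "latestIndex": index, "minDifference": minimum }
--         return
--
--     # Update index, preserve minDifference
--     history[number] = { "latestIndex": index, "minDifference": minDifference }
--
-- def solve(case):
--     history = {}
--     for index, number in enumerate(case):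
--         updateHistory(index, number, history)
--
--     mins = []
--     for value in history.values():
--         minDifference = value["minDifference"]
--         if minDifference:
--             mins.append(minDifference)
--
--     if len(mins) == 0:
--         return -1
--
--     return min(mins) + 1
-- ===== SOURCE B (Python) =====
-- def solve(case):
--     order = sorted(range(len(case)), key=lambda i: (case[i], i))
--     best = None
--     for a, b in zip(order, order[1:]):
--         if case[a] == case[b] and (best is None or b - a < best):
--             best = b - a
--     return -1 if best is None else best + 1
-- ===== Notes on version B (the rewrite author's own statement) =====
-- stated objective: alternative
-- what changed: B replaces A's streaming dict of per-value records (latest index + running per-key minDifference) and its second scan over the dict by a sort-based algorithm: sort the index range by (value, index) so equal values become adjacent, then take the minimum index difference over adjacent same-value pairs of the sorted order.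
import Mathlib
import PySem

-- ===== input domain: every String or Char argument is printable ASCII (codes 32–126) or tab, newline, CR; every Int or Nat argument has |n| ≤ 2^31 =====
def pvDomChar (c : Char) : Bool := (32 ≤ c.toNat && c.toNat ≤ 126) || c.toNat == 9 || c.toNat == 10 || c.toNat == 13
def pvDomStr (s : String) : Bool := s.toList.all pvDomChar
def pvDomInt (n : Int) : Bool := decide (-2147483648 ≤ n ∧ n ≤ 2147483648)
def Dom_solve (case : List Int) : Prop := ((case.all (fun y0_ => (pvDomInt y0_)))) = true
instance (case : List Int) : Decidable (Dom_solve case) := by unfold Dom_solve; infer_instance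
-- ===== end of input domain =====

-- B replaces A's streaming per-value record dict (latest index + per-key minDifference) and its
-- second scan over the dict by a different algorithm: sort the indices by (value, index) so that
-- equal values become adjacent, then scan adjacent sorted pairs for the minimum gap (alternative).

-- ===== PORT A =====
-- truthiness of the Python value stored under "minDifference" (None or an int)
def truthyOpt (o : Option Int) : Bool :=
  match o with
  | none => false
  | some v => v != 0

-- the inner two-field dict {"latestIndex": _, "minDifference": _} is ported as the pair
-- (latestIndex, minDifference) — exact, the keys are fixed literals
def updateHistory (index : Int) (number : Int)
    (history : PySem.Dict Int (Int × Option Int)) : PySem.Dict Int (Int × Option Int) :=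
  match history.get? number with
  | none => history.insert number (index, none)
  | some value =>
    let latestIndex := value.1
    let minDifference := value.2
    let minimum := index - latestIndex
    -- `if not minDifference or minimum < minDifference:` — short-circuit: the comparison
    -- is only evaluated when minDifference is a truthy int
    match minDifference with
    | none => history.insert number (index, some minimum)
    | some m =>
      if m == 0 || minimum < m then history.insert number (index, some minimum)
      else history.insert number (index, some m)

def solve (case : List Int) : Int :=
  let history := (PySem.List.enumerate case 0).foldl
    (fun h p => updateHistory p.1 p.2 h) PySem.Dict.empty
  let mins := history.values.foldl
    (fun acc v => if truthyOpt v.2 then acc ++ [v.2.getD 0] else acc) ([] : List Int)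
  if mins.length = 0 then -1
  else (PySem.List.min? mins (fun y => y)).getD 0 + 1

-- ===== PORT B =====
-- order = sorted(range(len(case)), key=lambda i: (case[i], i)); the loop indices are always in
-- range, so case[i] is ported as pyGetD (exact here: no IndexError is reachable)
def solve_alt (case : List Int) : Int :=
  let order := PySem.List.sorted2 (PySem.List.pyRange 0 case.length 1)
      (fun i => PySem.List.pyGetD case i 0) (fun i => i)
  let best := (order.zip (PySem.List.slice order (some 1) none)).foldl
    (fun (best : Option Int) p =>
      if (PySem.List.pyGetD case p.1 0 == PySem.List.pyGetD case p.2 0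
          && (match best with | none => true | some m => decide (p.2 - p.1 < m)))
      then some (p.2 - p.1) else best) none
  match best with
  | none => -1
  | some b => b + 1

-- ===== PRECONDITION & SPEC =====
def Spec_solve (case : List Int) (out : Int) : Prop := out = solve_alt case
instance (case : List Int) (out : Int) : Decidable (Spec_solve case out) := by
  unfold Spec_solve; infer_instance

-- ===== CLAIM (what is proved, stated in full; the proofs are below) =====
def Claim_equal_solve : Prop := ∀ (case : List Int), Dom_solve case → Spec_solve case (solve case)

-- ===== LEMMAS AND PROOFS =====

-- proof-side stepping stone C: the one-pass version (last-index dict + global running min);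
-- the proof goes A = C (dict invariant) and C = B (both compute the minimum equal-value gap)
def solveC (case : List Int) : Int :=
  let st := (PySem.List.enumerate case 0).foldl
    (fun (st : PySem.Dict Int Int × Option Int) p =>
      let best' :=
        if st.1.contains p.2 then
          let gap := p.1 - st.1.getD p.2 0
          match st.2 with
          | none => some gap
          | some b => if gap < b then some gap else some b
        else st.2
      (st.1.insert p.2 p.1, best'))
    ((PySem.Dict.empty : PySem.Dict Int Int), (none : Option Int))
  match st.2 with
  | none => -1
  | some b => b + 1

-- ---------- part 1: A = C ----------

-- invariant tying A's loop state to C's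
def InvAB (i : Int) (h : PySem.Dict Int (Int × Option Int))
    (last : PySem.Dict Int Int) (best : Option Int) : Prop :=
  h.keys = last.keys ∧ h.keys.Nodup ∧
  (∀ k v, h.get? k = some v →
      last.get? k = some v.1 ∧ v.1 < i ∧ (∀ m, v.2 = some m → 1 ≤ m)) ∧
  best = (h.keys.filterMap (fun k => (h.getD k (0, none)).2)).min?

theorem foldl_min_out (l : List Int) : ∀ a x : Int, l.foldl min (min a x) = min (l.foldl min a) x := by
  induction l with
  | nil => intro a x; rfl
  | cons b t ih =>
    intro a x
    simp only [List.foldl_cons]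
    rw [min_right_comm a x b, ih]

theorem foldl_min_middle (L1 L2 : List Int) : ∀ (x a : Int),
    (L1 ++ x :: L2).foldl min a = min ((L1 ++ L2).foldl min a) x := by
  induction L1 with
  | nil => intro x a; simpa using foldl_min_out L2 a x
  | cons b t ih => intro x a; simp only [List.cons_append, List.foldl_cons]; exact ih x (min a b)

theorem min?_middle (L1 L2 : List Int) (x : Int) :
    (L1 ++ x :: L2).min? = some (((L1 ++ L2).min?).elim x (fun b => min b x)) := by
  cases L1 with
  | nil =>
    cases L2 with
    | nil => rfl
    | cons c t =>
      simp only [List.nil_append, List.min?_cons', List.foldl_cons, Option.elim]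
      rw [min_comm x c, foldl_min_out t c x, min_comm]
  | cons b t =>
    simp only [List.cons_append, List.min?_cons', Option.elim]
    rw [foldl_min_middle t L2 x b]

theorem foldl_mins (g : Int → Int × Option Int) :
    ∀ (ks : List Int), (∀ k ∈ ks, ∀ m, (g k).2 = some m → 1 ≤ m) → ∀ (acc : List Int),
    (ks.map g).foldl (fun acc v => if truthyOpt v.2 then acc ++ [v.2.getD 0] else acc) acc
      = acc ++ ks.filterMap (fun k => (g k).2) := by
  intro ks
  induction ks with
  | nil => intro _ acc; simp
  | cons k t ih =>
    intro hp acc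
    simp only [List.map_cons, List.foldl_cons, List.filterMap_cons]
    rcases hs : (g k).2 with _ | m
    · simpa [truthyOpt] using ih (fun k hk => hp k (List.mem_cons_of_mem _ hk)) acc
    · have hm : 1 ≤ m := hp k (List.mem_cons_self) m hs
      have ht : truthyOpt (some m) = true := by simp [truthyOpt]; omega
      rw [if_pos ht]
      simpa using ih (fun k hk => hp k (List.mem_cons_of_mem _ hk)) (acc ++ [(some m).getD 0])

theorem final_eq (i : Int) (h : PySem.Dict Int (Int × Option Int))
    (last : PySem.Dict Int Int) (best : Option Int) (hinv : InvAB i h last best) :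
    (let mins := h.values.foldl
        (fun acc v => if truthyOpt v.2 then acc ++ [v.2.getD 0] else acc) ([] : List Int)
     if mins.length = 0 then (-1 : Int)
     else (PySem.List.min? mins (fun y => y)).getD 0 + 1)
    = best.elim (-1) (fun b => b + 1) := by
  obtain ⟨hk, hnd, hpt, hbest⟩ := hinv
  have hv := PySem.Dict.values_eq_map_keys h hnd (0, none)
  have hmins : h.values.foldl
      (fun acc v => if truthyOpt v.2 then acc ++ [v.2.getD 0] else acc) ([] : List Int)
      = h.keys.filterMap (fun k => (h.getD k (0, none)).2) := by
    rw [hv, foldl_mins _ h.keys ?_ []]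
    · simp
    · intro k hk2 m hm
      have hne : h.get? k ≠ none := by
        rw [Ne, PySem.Dict.get?_eq_none_iff_not_mem_keys]; simp [hk2]
      rcases hg : h.get? k with _ | v
      · exact absurd hg hne
      · have := (hpt k v hg).2.2 m
        simp [PySem.Dict.getD_eq_get?_getD, hg] at hm
        exact this hm
  subst hbest
  simp only [hmins]
  rcases hF : h.keys.filterMap (fun k => (h.getD k (0, none)).2) with _ | ⟨x, t⟩
  · simp
  · simp only [List.length_cons, List.min?_cons']
    rw [PySem.List.min?_id_cons]
    simp

-- overwriting an existing key n changes exactly n's contribution in the filterMap over keys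
theorem F_insert (h : PySem.Dict Int (Int × Option Int)) (hnd : h.keys.Nodup) (n : Int)
    (v : Int × Option Int) (hget : h.get? n = some v) (p : Int × Option Int) :
    ∃ A1 A2 : List Int,
      h.keys.filterMap (fun k => (h.getD k (0, none)).2) = A1 ++ v.2.toList ++ A2 ∧
      (h.insert n p).keys.filterMap (fun k => ((h.insert n p).getD k (0, none)).2)
        = A1 ++ p.2.toList ++ A2 := by
  have hcn : h.contains n = true := by rw [PySem.Dict.contains_eq_isSome_get?, hget]; rfl
  have hmem : n ∈ h.keys := (PySem.Dict.contains_iff_mem_keys h n).mp hcn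
  obtain ⟨L1, L2, hsplit⟩ := List.append_of_mem hmem
  have hnd2 : (n :: (L1 ++ L2)).Nodup := List.nodup_middle.mp (hsplit ▸ hnd)
  have hnmem : n ∉ L1 ∧ n ∉ L2 := by
    have := (List.nodup_cons.mp hnd2).1
    constructor <;> intro hc <;> exact this (by simp [hc])
  refine ⟨L1.filterMap (fun k => (h.getD k (0, none)).2),
          L2.filterMap (fun k => (h.getD k (0, none)).2), ?_, ?_⟩
  · rw [hsplit, List.filterMap_append, List.filterMap_cons]
    have hgd : h.getD n (0, none) = v := by
      rw [PySem.Dict.getD_eq_get?_getD, hget]; rfl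
    rw [hgd]
    cases v.2 <;> simp
  · rw [PySem.Dict.keys_insert_of_contains h p hcn, hsplit,
        List.filterMap_append, List.filterMap_cons]
    have hgd' : (h.insert n p).getD n (0, none) = p :=
      PySem.Dict.getD_insert_self h n p (0, none)
    rw [hgd']
    have hc1 : L1.filterMap (fun k => ((h.insert n p).getD k (0, none)).2)
        = L1.filterMap (fun k => (h.getD k (0, none)).2) := by
      apply List.filterMap_congr
      intro k hk
      rw [PySem.Dict.getD_insert_of_ne h _ _ (show k ≠ n from fun he => hnmem.1 (he ▸ hk))]
    have hc2 : L2.filterMap (fun k => ((h.insert n p).getD k (0, none)).2)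
        = L2.filterMap (fun k => (h.getD k (0, none)).2) := by
      apply List.filterMap_congr
      intro k hk
      rw [PySem.Dict.getD_insert_of_ne h _ _ (show k ≠ n from fun he => hnmem.2 (he ▸ hk))]
    rw [hc1, hc2]
    cases p.2 <;> simp

theorem step_core (i n li : Int) (s : Option Int) (w : Int)
    (h : PySem.Dict Int (Int × Option Int)) (last : PySem.Dict Int Int)
    (hk : h.keys = last.keys) (hnd : h.keys.Nodup)
    (hpt : ∀ k v, h.get? k = some v →
        last.get? k = some v.1 ∧ v.1 < i ∧ (∀ m, v.2 = some m → 1 ≤ m))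
    (hget : h.get? n = some (li, s)) (hw : 1 ≤ w) :
    InvAB (i + 1) (h.insert n (i, some w)) (last.insert n i)
      ((h.insert n (i, some w)).keys.filterMap
        (fun k => ((h.insert n (i, some w)).getD k (0, none)).2)).min? := by
  have hcn : h.contains n = true := by rw [PySem.Dict.contains_eq_isSome_get?, hget]; rfl
  have hcl : last.contains n = true := by
    rw [PySem.Dict.contains_eq_decide_mem_keys, ← hk, ← PySem.Dict.contains_eq_decide_mem_keys]
    exact hcn
  refine ⟨?_, ?_, ?_, rfl⟩
  · rw [PySem.Dict.keys_insert_of_contains h _ hcn,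
        PySem.Dict.keys_insert_of_contains last i hcl, hk]
  · rw [PySem.Dict.keys_insert_of_contains h _ hcn]; exact hnd
  · intro k v hkv
    by_cases hkn : k = n
    · subst hkn
      rw [PySem.Dict.get?_insert_self] at hkv
      cases hkv
      refine ⟨PySem.Dict.get?_insert_self last k i, by omega, ?_⟩
      intro m hm
      cases hm
      exact hw
    · rw [PySem.Dict.get?_insert_of_ne h _ hkn] at hkv
      obtain ⟨h1, h2, h3⟩ := hpt k v hkv
      exact ⟨by rw [PySem.Dict.get?_insert_of_ne last i hkn]; exact h1, by omega, h3⟩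

def bstep (best : Option Int) (gap : Int) : Option Int :=
  match best with
  | none => some gap
  | some b => if gap < b then some gap else some b

theorem step_inv (i n : Int) (h : PySem.Dict Int (Int × Option Int))
    (last : PySem.Dict Int Int) (best : Option Int) (hinv : InvAB i h last best) :
    InvAB (i + 1) (updateHistory i n h) (last.insert n i)
      (if last.contains n then bstep best (i - last.getD n 0) else best) := by
  obtain ⟨hk, hnd, hpt, hbest⟩ := hinv
  have hcont : last.contains n = h.contains n := by
    rw [PySem.Dict.contains_eq_decide_mem_keys, PySem.Dict.contains_eq_decide_mem_keys, hk]
  unfold updateHistory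
  rcases hget : h.get? n with _ | v
  · -- new key
    have hcn : h.contains n = false := by rw [PySem.Dict.contains_eq_isSome_get?, hget]; rfl
    have hnmem : n ∉ h.keys := (PySem.Dict.get?_eq_none_iff_not_mem_keys h n).mp hget
    rw [hcont, hcn, if_neg (by simp)]
    refine ⟨?_, ?_, ?_, ?_⟩
    · rw [PySem.Dict.keys_insert_of_not_contains h _ hcn,
          PySem.Dict.keys_insert_of_not_contains last i (by rw [hcont, hcn]), hk]
    · exact PySem.Dict.nodup_keys_insert h n _ hnd
    · intro k v hkv
      by_cases hkn : k = n
      · subst hkn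
        rw [PySem.Dict.get?_insert_self] at hkv
        cases hkv
        exact ⟨PySem.Dict.get?_insert_self last k i, by omega, by intro m hm; cases hm⟩
      · rw [PySem.Dict.get?_insert_of_ne h _ hkn] at hkv
        obtain ⟨h1, h2, h3⟩ := hpt k v hkv
        exact ⟨by rw [PySem.Dict.get?_insert_of_ne last i hkn]; exact h1, by omega, h3⟩
    · rw [hbest]
      congr 1
      rw [PySem.Dict.keys_insert_of_not_contains h _ hcn, List.filterMap_append]
      have hc1 : h.keys.filterMap (fun k => ((h.insert n (i, none)).getD k (0, none)).2)
          = h.keys.filterMap (fun k => (h.getD k (0, none)).2) := by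
        apply List.filterMap_congr
        intro k hk2
        rw [PySem.Dict.getD_insert_of_ne h _ _ (show k ≠ n from fun he => hnmem (he ▸ hk2))]
      rw [hc1]
      simp [PySem.Dict.getD_insert_self]
  · -- existing key
    obtain ⟨li, s⟩ := v
    have hcn : h.contains n = true := by rw [PySem.Dict.contains_eq_isSome_get?, hget]; rfl
    obtain ⟨hlast, hli, hsm⟩ := hpt n (li, s) hget
    have hgd : last.getD n 0 = li := by rw [PySem.Dict.getD_eq_get?_getD, hlast]; rfl
    rw [hcont, hcn, if_pos rfl, hgd]
    rcases s with _ | m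
    · -- previous minDifference was None: store the new gap
      have hw : (1 : Int) ≤ i - li := by simp at hli; omega
      have hcore := step_core i n li none (i - li) h last hk hnd hpt hget hw
      obtain ⟨A1, A2, hFo, hFn⟩ := F_insert h hnd n (li, none) hget (i, some (i - li))
      have hFo2 : best = (A1 ++ A2).min? := by rw [hbest, hFo]; simp
      have hFn2 : (h.insert n (i, some (i - li))).keys.filterMap
          (fun k => ((h.insert n (i, some (i - li))).getD k (0, none)).2)
          = A1 ++ (i - li) :: A2 := by rw [hFn]; simp
      have hb' : bstep best (i - li) = ((h.insert n (i, some (i - li))).keys.filterMap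
          (fun k => ((h.insert n (i, some (i - li))).getD k (0, none)).2)).min? := by
        rw [hFn2, min?_middle, ← hFo2]
        rcases best with _ | b
        · rfl
        · simp only [bstep, Option.elim]
          rw [min_def]; split_ifs <;> simp only [Option.some.injEq] <;> omega
      exact hb' ▸ hcore
    · -- previous minDifference was some m (m ≥ 1): keep the smaller of m and the gap
      have hli' : li < i := by simpa using hli
      have hm1 : (1 : Int) ≤ m := hsm m rfl
      have hbeq : (m == 0) = false := by simp; omega
      show InvAB (i + 1)
        (if (m == 0 || decide (i - li < m)) = true then h.insert n (i, some (i - li))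
         else h.insert n (i, some m)) (last.insert n i) (bstep best (i - li))
      rw [hbeq, Bool.false_or]
      rw [← apply_ite (fun z => h.insert n (i, some z))]
      simp only [decide_eq_true_eq]
      set w := if i - li < m then i - li else m with hwdef
      have hw : (1 : Int) ≤ w := by rw [hwdef]; split_ifs <;> omega
      have hcore := step_core i n li (some m) w h last hk hnd hpt hget hw
      obtain ⟨A1, A2, hFo, hFn⟩ := F_insert h hnd n (li, some m) hget (i, some w)
      have hFo2 : best = (A1 ++ m :: A2).min? := by rw [hbest, hFo]; simp
      have hFn2 : (h.insert n (i, some w)).keys.filterMap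
          (fun k => ((h.insert n (i, some w)).getD k (0, none)).2)
          = A1 ++ w :: A2 := by rw [hFn]; simp
      have hb' : bstep best (i - li) = ((h.insert n (i, some w)).keys.filterMap
          (fun k => ((h.insert n (i, some w)).getD k (0, none)).2)).min? := by
        rw [hFn2, min?_middle, hFo2, min?_middle]
        rcases ho : (A1 ++ A2).min? with _ | x
        · simp only [bstep, Option.elim]
          rw [hwdef]
          split_ifs <;> rfl
        · simp only [bstep, Option.elim]
          rw [hwdef]
          simp only [min_def]
          split_ifs <;> simp only [Option.some.injEq] <;> omega
      exact hb' ▸ hcore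

theorem loop_eq (rest : List Int) : ∀ (i : Int) (h : PySem.Dict Int (Int × Option Int))
    (last : PySem.Dict Int Int) (best : Option Int), InvAB i h last best →
    (let mins := ((PySem.List.enumerate rest i).foldl (fun h p => updateHistory p.1 p.2 h)
        h).values.foldl
        (fun acc v => if truthyOpt v.2 then acc ++ [v.2.getD 0] else acc) ([] : List Int)
     if mins.length = 0 then (-1 : Int) else (PySem.List.min? mins (fun y => y)).getD 0 + 1)
    = (((PySem.List.enumerate rest i).foldl
        (fun (st : PySem.Dict Int Int × Option Int) p =>
          let best' :=
            if st.1.contains p.2 then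
              let gap := p.1 - st.1.getD p.2 0
              match st.2 with
              | none => some gap
              | some b => if gap < b then some gap else some b
            else st.2
          (st.1.insert p.2 p.1, best'))
        (last, best)).2).elim (-1) (fun b => b + 1) := by
  induction rest with
  | nil =>
    intro i h last best hinv
    simp only [PySem.List.enumerate_nil, List.foldl_nil]
    exact final_eq i h last best hinv
  | cons x t ih =>
    intro i h last best hinv
    rw [PySem.List.enumerate_cons]
    simp only [List.foldl_cons]
    exact ih (i + 1) _ _ _ (step_inv i x h last best hinv)

theorem A_eq_C (case : List Int) : solve case = solveC case := by
  unfold solve solveC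
  have hinv0 : InvAB 0 PySem.Dict.empty PySem.Dict.empty none := by
    refine ⟨rfl, ?_, ?_, ?_⟩
    · rw [PySem.Dict.keys_empty]; exact List.nodup_nil
    · intro k v hkv
      rw [PySem.Dict.get?_empty] at hkv
      cases hkv
    · rw [PySem.Dict.keys_empty]; rfl
  have h1 := loop_eq case 0 PySem.Dict.empty PySem.Dict.empty none hinv0
  have helim : ∀ o : Option Int, o.elim (-1 : Int) (fun b => b + 1)
      = (match o with | none => -1 | some b => b + 1) := by
    intro o; cases o <;> rfl
  rw [helim] at h1
  exact h1

-- ---------- part 2: the common specification ----------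

-- i < j are positions of a matching pair of values
def Gd (case : List Int) (i j : Nat) : Prop :=
  i < j ∧ j < case.length ∧ case.getD i 0 = case.getD j 0

-- o is the minimum gap j - i over all matching pairs (none if there is no pair)
def IsBest (case : List Int) (o : Option Int) : Prop :=
  (∀ i j : Nat, Gd case i j → ∃ m, o = some m ∧ m ≤ (j : Int) - (i : Int)) ∧
  (∀ m : Int, o = some m → ∃ i j : Nat, Gd case i j ∧ m = (j : Int) - (i : Int))

theorem IsBest_unique (case : List Int) (o1 o2 : Option Int)
    (h1 : IsBest case o1) (h2 : IsBest case o2) : o1 = o2 := by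
  rcases o1 with _ | m1 <;> rcases o2 with _ | m2
  · rfl
  · obtain ⟨i, j, hg, _⟩ := h2.2 m2 rfl
    obtain ⟨m, hm, _⟩ := h1.1 i j hg
    cases hm
  · obtain ⟨i, j, hg, _⟩ := h1.2 m1 rfl
    obtain ⟨m, hm, _⟩ := h2.1 i j hg
    cases hm
  · obtain ⟨i1, j1, hg1, he1⟩ := h1.2 m1 rfl
    obtain ⟨i2, j2, hg2, he2⟩ := h2.2 m2 rfl
    obtain ⟨x1, hx1, hle1⟩ := h1.1 i2 j2 hg2
    obtain ⟨x2, hx2, hle2⟩ := h2.1 i1 j1 hg1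
    cases hx1; cases hx2
    congr 1
    omega

-- ---------- part 3: C computes the minimum gap ----------

def cbestOf (case : List Int) : Option Int :=
  ((PySem.List.enumerate case 0).foldl
    (fun (st : PySem.Dict Int Int × Option Int) p =>
      let best' :=
        if st.1.contains p.2 then
          let gap := p.1 - st.1.getD p.2 0
          match st.2 with
          | none => some gap
          | some b => if gap < b then some gap else some b
        else st.2
      (st.1.insert p.2 p.1, best'))
    ((PySem.Dict.empty : PySem.Dict Int Int), (none : Option Int))).2

-- bstep is min-combination
theorem bstep_some (best : Option Int) (gap : Int) :
    ∃ m, bstep best gap = some m ∧ m ≤ gap ∧ (∀ b, best = some b → m ≤ b) ∧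
      (m = gap ∨ best = some m) := by
  rcases best with _ | b
  · refine ⟨gap, rfl, le_refl _, ?_, Or.inl rfl⟩
    intro b h
    cases h
  · have hd : bstep (some b) gap = if gap < b then some gap else some b := rfl
    rw [hd]
    split_ifs with h
    · refine ⟨gap, rfl, le_refl _, ?_, Or.inl rfl⟩
      intro c hc
      cases hc
      omega
    · refine ⟨b, rfl, by omega, ?_, Or.inr rfl⟩
      intro c hc
      cases hc
      omega

-- last-occurrence invariant for C's dict
def LastInv (done : List Int) (last : PySem.Dict Int Int) : Prop :=
  (∀ v i, last.get? v = some i → 0 ≤ i ∧ i < (done.length : Int) ∧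
      done.getD i.toNat 0 = v ∧
      ∀ k' : Nat, i.toNat < k' → k' < done.length → done.getD k' 0 ≠ v) ∧
  (∀ k : Nat, k < done.length → last.contains (done.getD k 0) = true)

theorem getD_append_lt (done : List Int) (x : Int) (k : Nat) (hk : k < done.length) :
    (done ++ [x]).getD k 0 = done.getD k 0 := by
  simp [List.getD_eq_getElem?_getD, List.getElem?_append_left hk]

theorem getD_append_len (done : List Int) (x : Int) :
    (done ++ [x]).getD done.length 0 = x := by
  simp [List.getD_eq_getElem?_getD]

theorem Gd_append (done : List Int) (x : Int) (i j : Nat) :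
    Gd (done ++ [x]) i j ↔
      (Gd done i j ∨ (j = done.length ∧ i < done.length ∧ done.getD i 0 = x)) := by
  unfold Gd
  constructor
  · rintro ⟨hij, hj, he⟩
    simp only [List.length_append, List.length_cons, List.length_nil] at hj
    by_cases hjt : j < done.length
    · left
      rw [getD_append_lt done x i (by omega), getD_append_lt done x j hjt] at he
      exact ⟨hij, hjt, he⟩
    · right
      have hje : j = done.length := by omega
      subst hje
      rw [getD_append_lt done x i (by omega), getD_append_len] at he
      exact ⟨rfl, by omega, he⟩
  · rintro (⟨hij, hj, he⟩ | ⟨hje, hi, he⟩)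
    · refine ⟨hij, by simp; omega, ?_⟩
      rw [getD_append_lt done x i (by omega), getD_append_lt done x j hj]
      exact he
    · subst hje
      refine ⟨hi, by simp, ?_⟩
      rw [getD_append_lt done x i hi, getD_append_len]
      exact he

theorem C_step (done : List Int) (x : Int) (last : PySem.Dict Int Int) (best : Option Int)
    (hL : LastInv done last) (hB : IsBest done best) :
    LastInv (done ++ [x]) (last.insert x (done.length : Int)) ∧
    IsBest (done ++ [x])
      (if last.contains x then bstep best ((done.length : Int) - last.getD x 0) else best) := by
  obtain ⟨hL1, hL2⟩ := hL
  obtain ⟨hB1, hB2⟩ := hB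
  constructor
  · -- LastInv is preserved
    constructor
    · intro v i hv
      by_cases hvx : v = x
      · subst hvx
        rw [PySem.Dict.get?_insert_self] at hv
        cases hv
        refine ⟨Int.natCast_nonneg _, by simp, ?_, ?_⟩
        · simp only [Int.toNat_natCast]
          exact getD_append_len done _
        · intro k' hk1 hk2
          simp only [Int.toNat_natCast] at hk1
          simp only [List.length_append, List.length_cons, List.length_nil] at hk2
          omega
      · rw [PySem.Dict.get?_insert_of_ne last _ (fun he => hvx he)] at hv
        obtain ⟨h0, h1, h2, h3⟩ := hL1 v i hv
        refine ⟨h0, by simp; omega, ?_, ?_⟩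
        · rw [getD_append_lt done x i.toNat (by omega)]; exact h2
        · intro k' hk1 hk2
          simp only [List.length_append, List.length_cons, List.length_nil] at hk2
          by_cases hkt : k' < done.length
          · rw [getD_append_lt done x k' hkt]; exact h3 k' hk1 hkt
          · have : k' = done.length := by omega
            subst this
            rw [getD_append_len]
            exact fun he => hvx he.symm
    · intro k hk
      simp only [List.length_append, List.length_cons, List.length_nil] at hk
      by_cases hkt : k < done.length
      · rw [getD_append_lt done x k hkt]
        by_cases hvx : done.getD k 0 = x
        · rw [hvx, PySem.Dict.contains_eq_isSome_get?, PySem.Dict.get?_insert_self]; rfl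
        · rw [PySem.Dict.contains_eq_isSome_get?,
              PySem.Dict.get?_insert_of_ne last _ (fun he => hvx he),
              ← PySem.Dict.contains_eq_isSome_get?]
          exact hL2 k hkt
      · have : k = done.length := by omega
        subst this
        rw [getD_append_len, PySem.Dict.contains_eq_isSome_get?, PySem.Dict.get?_insert_self]
        rfl
  · -- IsBest is preserved
    by_cases hc : last.contains x = true
    · -- x was seen before: the new best is bstep best (t - last[x])
      rw [if_pos hc]
      rw [PySem.Dict.contains_eq_isSome_get?] at hc
      rcases hget : last.get? x with _ | li
      · rw [hget] at hc; cases hc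
      obtain ⟨h0, h1, h2, h3⟩ := hL1 x li hget
      have hgd : last.getD x 0 = li := by rw [PySem.Dict.getD_eq_get?_getD, hget]; rfl
      rw [hgd]
      obtain ⟨m, hm, hmgap, hmb, hmcase⟩ := bstep_some best ((done.length : Int) - li)
      rw [hm]
      constructor
      · intro i j hg
        refine ⟨m, rfl, ?_⟩
        rcases (Gd_append done x i j).mp hg with hold | ⟨hje, hi, he⟩
        · obtain ⟨b, hb, hble⟩ := hB1 i j hold
          have := hmb b hb
          omega
        · -- new pair ending at t: its left end is at most li
          have hile : i ≤ li.toNat := by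
            by_contra hgt
            exact h3 i (by omega) hi he
          subst hje
          omega
      · intro m' hm'
        cases hm'
        rcases hmcase with hmg | hmb'
        · refine ⟨li.toNat, done.length, ?_, by omega⟩
          rw [Gd_append]
          right
          exact ⟨rfl, by omega, h2⟩
        · obtain ⟨i, j, hg, he⟩ := hB2 m hmb'
          exact ⟨i, j, (Gd_append done x i j).mpr (Or.inl hg), he⟩
    · -- x is new: no new pair, best unchanged
      rw [if_neg hc]
      have hnox : ∀ k : Nat, k < done.length → done.getD k 0 ≠ x := by
        intro k hk he
        exact hc (he ▸ hL2 k hk)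
      constructor
      · intro i j hg
        rcases (Gd_append done x i j).mp hg with hold | ⟨hje, hi, he⟩
        · exact hB1 i j hold
        · exact absurd he (hnox i hi)
      · intro m hm
        obtain ⟨i, j, hg, he⟩ := hB2 m hm
        exact ⟨i, j, (Gd_append done x i j).mpr (Or.inl hg), he⟩

def cstepF : (PySem.Dict Int Int × Option Int) → Int × Int → (PySem.Dict Int Int × Option Int) :=
  fun st p => (st.1.insert p.2 p.1,
    if st.1.contains p.2 then bstep st.2 (p.1 - st.1.getD p.2 0) else st.2)

theorem C_loop (rest : List Int) : ∀ (done : List Int) (last : PySem.Dict Int Int)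
    (best : Option Int), LastInv done last → IsBest done best →
    IsBest (done ++ rest)
      (((PySem.List.enumerate rest (done.length : Int)).foldl cstepF (last, best)).2) := by
  induction rest with
  | nil => intro done last best _ hB; simpa using hB
  | cons x r ih =>
    intro done last best hL hB
    rw [PySem.List.enumerate_cons]
    simp only [List.foldl_cons]
    obtain ⟨hL', hB'⟩ := C_step done x last best hL hB
    have hlen : ((done.length : Int) + 1) = (((done ++ [x]).length : Int)) := by
      simp
    have hres := ih (done ++ [x]) (last.insert x (done.length : Int))
      (if last.contains x then bstep best ((done.length : Int) - last.getD x 0) else best)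
      hL' hB'
    rw [← hlen] at hres
    simpa [cstepF] using hres

theorem IsBest_C (case : List Int) : IsBest case (cbestOf case) := by
  have h0 : LastInv [] PySem.Dict.empty := by
    constructor
    · intro v i hv
      rw [PySem.Dict.get?_empty] at hv
      cases hv
    · intro k hk
      simp at hk
  have hB0 : IsBest [] none := by
    constructor
    · intro i j hg
      obtain ⟨_, hj, _⟩ := hg
      simp at hj
    · intro m hm
      cases hm
  have hres := C_loop case [] PySem.Dict.empty none h0 hB0
  have heq : cbestOf case
      = ((PySem.List.enumerate case ((([] : List Int).length : Nat) : Int)).foldl cstepF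
        (PySem.Dict.empty, none)).2 := rfl
  rw [heq]
  simpa using hres

-- ---------- part 4: B computes the minimum gap ----------

def borderOf (case : List Int) : List Int :=
  PySem.List.sorted2 (PySem.List.pyRange 0 case.length 1)
    (fun i => PySem.List.pyGetD case i 0) (fun i => i)

def bbestOf (case : List Int) : Option Int :=
  ((borderOf case).zip (PySem.List.slice (borderOf case) (some 1) none)).foldl
    (fun (best : Option Int) p =>
      if (PySem.List.pyGetD case p.1 0 == PySem.List.pyGetD case p.2 0
          && (match best with | none => true | some m => decide (p.2 - p.1 < m)))
      then some (p.2 - p.1) else best) none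

def keyB (case : List Int) (i : Int) : Int := PySem.List.pyGetD case i 0

def ltB (case : List Int) (a b : Int) : Bool :=
  decide (keyB case a < keyB case b)
    || (!decide (keyB case b < keyB case a) && decide (a < b))

theorem ltB_irr (case : List Int) (a : Int) : ltB case a a = false := by
  simp [ltB]

theorem ltB_trans_neg (case : List Int) (x y z : Int)
    (h1 : ltB case x y = true) (h2 : ltB case z y = false) : ltB case z x = false := by
  simp only [ltB, Bool.or_eq_true, Bool.or_eq_false_iff, Bool.and_eq_true,
    Bool.and_eq_false_iff, Bool.not_eq_true', Bool.not_eq_false',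
    decide_eq_true_eq, decide_eq_false_iff_not] at *
  omega

theorem pairwise_insertBy {α : Type} (before : α → α → Bool)
    (hIrr : ∀ a, before a a = false)
    (hTr : ∀ x y z, before x y = true → before z y = false → before z x = false)
    (x : α) (ys : List α) (hys : ys.Pairwise (fun a b => before b a = false)) :
    (PySem.List.insertBy before x ys).Pairwise (fun a b => before b a = false) := by
  induction ys with
  | nil => simp [PySem.List.insertBy]
  | cons y ys ih =>
    have heq : PySem.List.insertBy before x (y :: ys)
        = if before x y = true then x :: y :: ys
          else y :: PySem.List.insertBy before x ys := rfl
    rw [heq]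
    rw [List.pairwise_cons] at hys
    obtain ⟨hy, hys'⟩ := hys
    split_ifs with hxy
    · refine List.Pairwise.cons ?_ (List.Pairwise.cons hy hys')
      intro z hz
      rcases List.mem_cons.mp hz with rfl | hz'
      · exact hTr x z z hxy (hIrr z)
      · exact hTr x y z hxy (hy z hz')
    · refine List.Pairwise.cons ?_ (ih hys')
      intro z hz
      rcases (PySem.List.mem_insertBy before x z ys).mp hz with rfl | hz'
      · exact Bool.not_eq_true _ ▸ hxy
      · exact hy z hz'

theorem pairwise_foldl_insertBy {α : Type} (before : α → α → Bool)
    (hIrr : ∀ a, before a a = false)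
    (hTr : ∀ x y z, before x y = true → before z y = false → before z x = false)
    (xs : List α) : ∀ (acc : List α), acc.Pairwise (fun a b => before b a = false) →
    (xs.foldl (fun acc x => PySem.List.insertBy before x acc) acc).Pairwise
      (fun a b => before b a = false) := by
  induction xs with
  | nil => intro acc h; simpa using h
  | cons x t ih =>
    intro acc h
    simp only [List.foldl_cons]
    exact ih _ (pairwise_insertBy before hIrr hTr x acc h)

-- strict (value, index)-lexicographic ordering of B's sorted index list
theorem border_pairwise (case : List Int) :
    (borderOf case).Pairwise (fun a b =>
      keyB case a < keyB case b ∨ (keyB case a = keyB case b ∧ a < b)) := by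
  have heq : borderOf case = (PySem.List.pyRange 0 case.length 1).foldl
      (fun acc x => PySem.List.insertBy (ltB case) x acc) [] := rfl
  have hpw : (borderOf case).Pairwise (fun a b => ltB case b a = false) := by
    rw [heq]
    exact pairwise_foldl_insertBy (ltB case) (ltB_irr case) (ltB_trans_neg case) _ []
      List.Pairwise.nil
  have hnd : (borderOf case).Nodup := by
    have hperm := PySem.List.sorted2_perm (PySem.List.pyRange 0 case.length 1)
      (fun i => PySem.List.pyGetD case i 0) (fun i => i) false
    have : (PySem.List.pyRange 0 (case.length : Int) 1).Nodup := by
      rw [PySem.List.pyRange_zero_natCast]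
      exact List.Nodup.map (fun a b h => by exact_mod_cast h) List.nodup_range
    exact (hperm.nodup_iff).mpr this
  have := hpw.and hnd
  refine this.imp ?_
  intro a b hab
  obtain ⟨hlt, hne⟩ := hab
  simp only [ltB, Bool.or_eq_false_iff, Bool.and_eq_false_iff, Bool.not_eq_false',
    decide_eq_false_iff_not, decide_eq_true_eq] at hlt
  rcases lt_trichotomy (keyB case a) (keyB case b) with h | h | h
  · exact Or.inl h
  · refine Or.inr ⟨h, ?_⟩
    rcases hlt.2 with hc | hc
    · omega
    · omega
  · exact absurd h hlt.1

theorem border_mem (case : List Int) (i : Int) :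
    i ∈ borderOf case ↔ 0 ≤ i ∧ i < (case.length : Int) := by
  have hperm := PySem.List.sorted2_perm (PySem.List.pyRange 0 case.length 1)
    (fun i => PySem.List.pyGetD case i 0) (fun i => i) false
  rw [show (borderOf case) = PySem.List.sorted2 (PySem.List.pyRange 0 case.length 1)
      (fun i => PySem.List.pyGetD case i 0) (fun i => i) false from rfl]
  rw [hperm.mem_iff]
  exact PySem.List.mem_pyRange_one

theorem keyB_eq_getD (case : List Int) (k : Nat) (hk : k < case.length) :
    keyB case (k : Int) = case.getD k 0 := by
  rw [keyB, PySem.List.pyGetD_eq_getElem case 0 (Int.natCast_nonneg _) (by exact_mod_cast hk)]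
  simp [List.getD_eq_getElem?_getD, List.getElem?_eq_getElem hk]

theorem mem_zip_drop1 {α : Type} {L : List α} {p : α × α} :
    p ∈ L.zip (L.drop 1) ↔ ∃ (t : Nat), ∃ _ : t + 1 < L.length, p = (L[t], L[t + 1]) := by
  constructor
  · intro hp
    obtain ⟨t, ht, he⟩ := List.mem_iff_getElem.mp hp
    rw [List.length_zip, List.length_drop] at ht
    have ht' : t + 1 < L.length := by omega
    refine ⟨t, ht', ?_⟩
    rw [← he, List.getElem_zip, List.getElem_drop]
    simp [Nat.add_comm]
  · rintro ⟨t, ht, rfl⟩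
    apply List.mem_iff_getElem.mpr
    have hlz : t < (L.zip (L.drop 1)).length := by
      rw [List.length_zip, List.length_drop]; omega
    refine ⟨t, hlz, ?_⟩
    rw [List.getElem_zip, List.getElem_drop]
    simp [Nat.add_comm]

-- B's loop is a running minimum over the same-key adjacent gaps
def stepB (case : List Int) : Option Int → Int × Int → Option Int :=
  fun best p =>
    if (PySem.List.pyGetD case p.1 0 == PySem.List.pyGetD case p.2 0
        && (match best with | none => true | some m => decide (p.2 - p.1 < m)))
    then some (p.2 - p.1) else best

theorem stepB_analysis (case : List Int) (b : Option Int) (p : Int × Int) :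
    (stepB case b p = some (p.2 - p.1) ∧ keyB case p.1 = keyB case p.2 ∧
      (∀ x, b = some x → p.2 - p.1 ≤ x)) ∨
    (stepB case b p = b ∧ (keyB case p.1 = keyB case p.2 →
      ∃ x, b = some x ∧ x ≤ p.2 - p.1)) := by
  unfold stepB
  by_cases hk : keyB case p.1 = keyB case p.2
  · rcases b with _ | x
    · left
      refine ⟨by simp [keyB] at hk; simp [hk], hk, ?_⟩
      intro x h
      cases h
    · by_cases hlt : p.2 - p.1 < x
      · left
        refine ⟨?_, hk, ?_⟩
        · simp only [keyB] at hk
          simp [hk, hlt]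
        · intro y hy
          cases hy
          omega
      · right
        refine ⟨?_, fun _ => ⟨x, rfl, by omega⟩⟩
        simp only [keyB] at hk
        simp [hk, hlt]
  · right
    refine ⟨?_, fun h => absurd h hk⟩
    have : (PySem.List.pyGetD case p.1 0 == PySem.List.pyGetD case p.2 0) = false := by
      simp only [keyB] at hk
      simp [hk]
    simp [this]

theorem foldB_stays_some (case : List Int) (L : List (Int × Int)) :
    ∀ (x : Int), ∃ m, L.foldl (stepB case) (some x) = some m := by
  induction L with
  | nil => intro x; exact ⟨x, rfl⟩
  | cons q t ih =>
    intro x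
    simp only [List.foldl_cons]
    rcases stepB_analysis case (some x) q with ⟨he, _, _⟩ | ⟨he, _⟩ <;> rw [he]
    · exact ih _
    · exact ih _

theorem foldB_min (case : List Int) (L : List (Int × Int)) :
    ∀ (b : Option Int) (m : Int), L.foldl (stepB case) b = some m →
    (∀ p ∈ L, keyB case p.1 = keyB case p.2 → m ≤ p.2 - p.1) ∧
    (∀ x, b = some x → m ≤ x) := by
  induction L with
  | nil =>
    intro b m h
    refine ⟨by simp, ?_⟩
    intro x hx
    rw [hx] at h
    cases h
    exact le_refl _
  | cons q t ih =>
    intro b m h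
    simp only [List.foldl_cons] at h
    obtain ⟨iht, ihb⟩ := ih (stepB case b q) m h
    rcases stepB_analysis case b q with ⟨he, hk, hup⟩ | ⟨he, hk⟩
    · have hmq : m ≤ q.2 - q.1 := ihb _ he
      refine ⟨?_, ?_⟩
      · intro p hp hkp
        rcases List.mem_cons.mp hp with rfl | hp'
        · exact hmq
        · exact iht p hp' hkp
      · intro x hx
        have := hup x hx
        omega
    · rw [he] at ihb
      refine ⟨?_, ihb⟩
      intro p hp hkp
      rcases List.mem_cons.mp hp with rfl | hp'
      · obtain ⟨x, hx, hxle⟩ := hk hkp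
        have := ihb x hx
        omega
      · exact iht p hp' hkp

theorem foldB_progress (case : List Int) (L : List (Int × Int)) :
    ∀ (b : Option Int) (p : Int × Int), p ∈ L → keyB case p.1 = keyB case p.2 →
    ∃ m, L.foldl (stepB case) b = some m := by
  induction L with
  | nil =>
    intro b p hp
    cases hp
  | cons q t ih =>
    intro b p hp hk
    simp only [List.foldl_cons]
    rcases List.mem_cons.mp hp with rfl | hp'
    · rcases stepB_analysis case b p with ⟨he, _, _⟩ | ⟨he, hk2⟩ <;> rw [he]
      · exact foldB_stays_some case t _
      · obtain ⟨x, hx, _⟩ := hk2 hk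
        rw [hx]
        exact foldB_stays_some case t _
    · exact ih _ p hp' hk

theorem foldB_src (case : List Int) (L : List (Int × Int)) :
    ∀ (b : Option Int) (m : Int), L.foldl (stepB case) b = some m →
    (∃ p ∈ L, keyB case p.1 = keyB case p.2 ∧ m = p.2 - p.1) ∨ b = some m := by
  induction L with
  | nil =>
    intro b m h
    exact Or.inr h
  | cons q t ih =>
    intro b m h
    simp only [List.foldl_cons] at h
    rcases ih _ m h with ⟨p, hp, hk, he⟩ | hb
    · exact Or.inl ⟨p, List.mem_cons_of_mem _ hp, hk, he⟩
    · rcases stepB_analysis case b q with ⟨he, hk, _⟩ | ⟨he, _⟩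
      · rw [he] at hb
        cases hb
        exact Or.inl ⟨q, List.mem_cons_self, hk, rfl⟩
      · rw [he] at hb
        exact Or.inr hb

theorem IsBest_B (case : List Int) : IsBest case (bbestOf case) := by
  have hslice : PySem.List.slice (borderOf case) (some 1) none = (borderOf case).drop 1 := by
    have := PySem.List.slice_from_natCast (borderOf case) 1
    simpa using this
  have hbb : bbestOf case
      = ((borderOf case).zip ((borderOf case).drop 1)).foldl (stepB case) none := by
    rw [bbestOf, hslice]
    rfl
  have hQ := border_pairwise case
  rw [List.pairwise_iff_getElem] at hQ
  constructor
  · -- every matching pair bounds the result from above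
    intro i j hg
    obtain ⟨hij, hjlen, hgd⟩ := hg
    have hilen : i < case.length := lt_trans hij hjlen
    obtain ⟨ta, hta, hae⟩ := List.mem_iff_getElem.mp
      ((border_mem case (i : Int)).mpr ⟨Int.natCast_nonneg _, by exact_mod_cast hilen⟩)
    obtain ⟨tb, htb, hbe⟩ := List.mem_iff_getElem.mp
      ((border_mem case (j : Int)).mpr ⟨Int.natCast_nonneg _, by exact_mod_cast hjlen⟩)
    have hkab : keyB case (i : Int) = keyB case (j : Int) := by
      rw [keyB_eq_getD case i hilen, keyB_eq_getD case j hjlen]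
      exact hgd
    have htab : ta < tb := by
      rcases lt_trichotomy ta tb with h | h | h
      · exact h
      · exfalso
        subst h
        rw [hae] at hbe
        omega
      · exfalso
        have hQ2 := hQ tb ta htb hta h
        rw [hae, hbe] at hQ2
        rcases hQ2 with hlt | ⟨_, hlt⟩
        · rw [hkab] at hlt
          exact lt_irrefl _ hlt
        · omega
    have hta1 : ta + 1 < (borderOf case).length := by omega
    have hQac := hQ ta (ta + 1) hta hta1 (by omega)
    rw [hae] at hQac
    have hcb : keyB case (i : Int) = keyB case ((borderOf case)[ta + 1]) ∧
        (borderOf case)[ta + 1] ≤ (j : Int) := by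
      by_cases he : ta + 1 = tb
      · subst he
        rw [hbe]
        exact ⟨hkab, le_refl _⟩
      · have hQ2 := hQ (ta + 1) tb hta1 htb (by omega)
        rw [hbe] at hQ2
        have h1le : keyB case (i : Int) ≤ keyB case ((borderOf case)[ta + 1]) := by
          rcases hQac with h | ⟨h, _⟩
          · exact le_of_lt h
          · exact le_of_eq h
        have h2le : keyB case ((borderOf case)[ta + 1]) ≤ keyB case (j : Int) := by
          rcases hQ2 with h | ⟨h, _⟩
          · exact le_of_lt h
          · exact le_of_eq h
        rw [← hkab] at h2le
        have hkeq : keyB case (i : Int) = keyB case ((borderOf case)[ta + 1]) := by omega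
        refine ⟨hkeq, ?_⟩
        rcases hQ2 with h | ⟨_, h⟩
        · rw [← hkab, ← hkeq] at h
          omega
        · exact le_of_lt h
    obtain ⟨hkac, hcj⟩ := hcb
    have hpair : ((i : Int), (borderOf case)[ta + 1])
        ∈ (borderOf case).zip ((borderOf case).drop 1) :=
      mem_zip_drop1.mpr ⟨ta, hta1, by rw [hae]⟩
    obtain ⟨m, hm⟩ := foldB_progress case _ none _ hpair hkac
    refine ⟨m, by rw [hbb]; exact hm, ?_⟩
    have hmin := (foldB_min case _ none m hm).1 _ hpair hkac
    simp only at hmin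
    omega
  · -- the result, if any, is the gap of a matching pair
    intro m hm
    rw [hbb] at hm
    rcases foldB_src case _ none m hm with ⟨p, hp, hk, he⟩ | hnone
    · obtain ⟨t, ht1, hpe⟩ := mem_zip_drop1.mp hp
      subst hpe
      simp only at hk he
      have hQt := hQ t (t + 1) (by omega) ht1 (by omega)
      have hlt : (borderOf case)[t] < (borderOf case)[t + 1] := by
        rcases hQt with h | ⟨_, h⟩
        · rw [hk] at h
          exact absurd h (lt_irrefl _)
        · exact h
      have hb1 := (border_mem case _).mp (List.getElem_mem (by omega : t < (borderOf case).length))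
      have hb2 := (border_mem case _).mp (List.getElem_mem ht1)
      refine ⟨((borderOf case)[t]).toNat, ((borderOf case)[t + 1]).toNat, ⟨?_, ?_, ?_⟩, ?_⟩
      · omega
      · omega
      · have hc1 : (((borderOf case)[t]).toNat : Int) = (borderOf case)[t] :=
          Int.toNat_of_nonneg hb1.1
        have hc2 : (((borderOf case)[t + 1]).toNat : Int) = (borderOf case)[t + 1] :=
          Int.toNat_of_nonneg hb2.1
        have hg1 := keyB_eq_getD case ((borderOf case)[t]).toNat (by omega)
        have hg2 := keyB_eq_getD case ((borderOf case)[t + 1]).toNat (by omega)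
        rw [hc1] at hg1
        rw [hc2] at hg2
        rw [← hg1, ← hg2, hk]
      · omega
    · cases hnone

-- ===== VERDICT (by name: the statement is the Claim_ definition above) =====
theorem solve_spec : Claim_equal_solve := by
  intro case _
  unfold Spec_solve
  rw [A_eq_C]
  have hb := IsBest_unique case _ _ (IsBest_C case) (IsBest_B case)
  show solveC case = solve_alt case
  unfold solveC solve_alt
  unfold cbestOf bbestOf borderOf at hb
  simp only [hb]
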